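-- pv_equiv track=rewrite | github.com/zei-is-sleeping/tchess | ui/renderer.py | get_graveyard
-- ===== SOURCE A (Python) =====
-- USE_ICONS = False
--
-- ICONS = {
--     'r': '♜', 'n': '♞', 'b': '♝', 'q': '♛', 'k': '♚', 'p': '♟',
--     'R': '♜', 'N': '♞', 'B': '♝', 'Q': '♛', 'K': '♚', 'P': '♟',
--     '+': ' '
-- }
--
-- LETTERS = {
--     'r': 'R', 'n': 'N', 'b': 'B', 'q': 'Q', 'k': 'K', 'p': 'P',
--     'R': 'R', 'N': 'N', 'B': 'B', 'Q': 'Q', 'K': 'K', 'P': 'P',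
--     '+': ' '
-- }
--
-- def get_graveyard(board):
--     initial = {
--         'P': 8, 'R': 2, 'N': 2, 'B': 2, 'Q': 1, 'K': 1,
--         'p': 8, 'r': 2, 'n': 2, 'b': 2, 'q': 1, 'k': 1
--     }
--     current = {}
--     for row in board:
--         for char in row:
--             if char != "+":
--                 current[char] = current.get(char, 0) + 1
--
--     graveyard = {'w': [], 'b': []}
--     symbols = ICONS if USE_ICONS else LETTERS
--
--     for piece, count in initial.items():
--         diff = count - current.get(piece, 0)
--         if diff > 0:
--             color = 'w' if piece.isupper() else 'b'
--             graveyard[color].extend([symbols[piece]] * diff)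
--
--     return graveyard
-- ===== SOURCE B (Python) =====
-- def get_graveyard(board):
--     # Subtractive roster: start from the full initial roster of each side and
--     # remove one roster entry per matching board cell; the leftovers ARE the graveyard.
--     white = list('PPPPPPPPRRNNBBQK')
--     black = list('pppppppprrnnbbqk')
--     for row in board:
--         for char in row:
--             if char in white:
--                 white.remove(char)
--             elif char in black:
--                 black.remove(char)
--     return {'w': white, 'b': [c.upper() for c in black]}
-- ===== Notes on version B (the rewrite author's own statement) =====
-- stated objective: alternative
-- what changed: B replaces A's tally-then-diff scheme (count every board char into a dict, then subtract from the initial counts) by a subtractive roster: it materialises each side's full initial roster as a list and deletes one entry per matching board cell in a single pass; whatever remains is the graveyard, with no counting or arithmetic at all.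
import Mathlib
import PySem

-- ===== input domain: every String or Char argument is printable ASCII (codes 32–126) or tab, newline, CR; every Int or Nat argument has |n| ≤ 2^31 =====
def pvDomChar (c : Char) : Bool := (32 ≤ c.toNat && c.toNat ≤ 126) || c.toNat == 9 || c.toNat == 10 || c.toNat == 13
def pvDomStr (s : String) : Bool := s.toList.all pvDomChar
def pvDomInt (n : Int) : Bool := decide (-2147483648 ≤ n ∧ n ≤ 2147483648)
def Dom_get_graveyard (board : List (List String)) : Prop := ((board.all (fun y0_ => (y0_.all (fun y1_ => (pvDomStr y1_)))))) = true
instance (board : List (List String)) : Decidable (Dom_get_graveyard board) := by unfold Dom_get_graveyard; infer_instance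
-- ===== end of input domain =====

-- B replaces A's tally-then-diff scheme by a subtractive roster: each side's full initial
-- roster is a list from which one entry is deleted per matching board cell; the leftovers
-- are the graveyard (objective: alternative decomposition, same exact result).

-- str.isupper(), ported by hand over List Char (exact on the ASCII domain):
-- at least one cased character and no lowercase one.
def pvStrIsupper (s : String) : Bool :=
  s.toList.any (fun c => PySem.Chars.isupper c) && s.toList.all (fun c => !(PySem.Chars.islower c))

-- ===== PORT A =====
def pvLETTERS : PySem.Dict String String :=
  PySem.Dict.ofList [("r","R"),("n","N"),("b","B"),("q","Q"),("k","K"),("p","P"),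
                     ("R","R"),("N","N"),("B","B"),("Q","Q"),("K","K"),("P","P"),("+"," ")]

def get_graveyard (board : List (List String)) : List (String × List String) :=
  let initial : List (String × Int) :=
    [("P",8),("R",2),("N",2),("B",2),("Q",1),("K",1),
     ("p",8),("r",2),("n",2),("b",2),("q",1),("k",1)]
  let current : PySem.Dict String Int :=
    board.foldl (fun cur row =>
      row.foldl (fun cur ch =>
        if ch ≠ "+" then cur.insert ch (cur.getD ch 0 + 1) else cur) cur) PySem.Dict.empty
  -- symbols = LETTERS (USE_ICONS is False); symbols[piece] never misses (piece ∈ initial ⊆ LETTERS)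
  let graveyard : PySem.Dict String (List String) :=
    initial.foldl (fun g pc =>
      let diff := pc.2 - current.getD pc.1 0
      if diff > 0 then
        let color := if pvStrIsupper pc.1 then "w" else "b"
        g.modify color [] (· ++ List.replicate diff.toNat (pvLETTERS.getD pc.1 " "))
      else g)
      (PySem.Dict.ofList [("w", []), ("b", [])])
  graveyard.items

-- ===== PORT B =====
-- one board cell: delete it from the white roster if present, else from the black one
def pvStep (st : List String × List String) (ch : String) : List String × List String :=
  if st.1.contains ch then (st.1.erase ch, st.2)
  else if st.2.contains ch then (st.1, st.2.erase ch)
  else st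

def get_graveyard_alt (board : List (List String)) : List (String × List String) :=
  let init : List String × List String :=
    (["P","P","P","P","P","P","P","P","R","R","N","N","B","B","Q","K"],
     ["p","p","p","p","p","p","p","p","r","r","n","n","b","b","q","k"])
  let st := board.foldl (fun st row => row.foldl pvStep st) init
  [("w", st.1), ("b", st.2.map PySem.Str.upper)]

-- ===== PRECONDITION & SPEC =====
def Spec_get_graveyard (board : List (List String)) (out : List (String × List String)) : Prop := out = get_graveyard_alt board
instance (board : List (List String)) (out : List (String × List String)) : Decidable (Spec_get_graveyard board out) := by unfold Spec_get_graveyard; infer_instance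

-- ===== CLAIM (what is proved, stated in full; the proofs are below) =====
def Claim_equal_get_graveyard : Prop := ∀ (board : List (List String)), Dom_get_graveyard board → Spec_get_graveyard board (get_graveyard board)

-- ===== LEMMAS AND PROOFS =====

-- ---- A-side characterisation (tally dict and graveyard fold) ----

-- the tally dict's entry for a piece v ≠ "+" is the number of cells of the row equal to v
theorem pv_cnt_row (row : List String) (d : PySem.Dict String Int) (v : String) (hv : v ≠ "+") :
    (row.foldl (fun cur ch =>
        if ch ≠ "+" then cur.insert ch (cur.getD ch 0 + 1) else cur) d).getD v 0
      = d.getD v 0 + row.count v := by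
  induction row generalizing d with
  | nil => simp
  | cons ch row ih =>
    rw [List.foldl_cons, ih]
    by_cases hch : ch = "+"
    · rw [if_neg (by simp [hch])]
      have hvch : v ≠ ch := by rw [hch]; exact hv
      simp [List.count_cons]
      exact fun h => hvch h.symm
    · rw [if_pos hch, PySem.Dict.getD_insert]
      by_cases hcv : v = ch
      · rw [if_pos hcv, hcv]
        simp
        ring
      · rw [if_neg hcv]
        simp [List.count_cons]
        exact fun h => hcv h.symm

theorem pv_cnt_board (board : List (List String)) (d : PySem.Dict String Int) (v : String) (hv : v ≠ "+") :
    (board.foldl (fun cur row =>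
        row.foldl (fun cur ch =>
          if ch ≠ "+" then cur.insert ch (cur.getD ch 0 + 1) else cur) cur) d).getD v 0
      = d.getD v 0 + (board.map (fun row => (row.count v : Int))).sum := by
  induction board generalizing d with
  | nil => simp
  | cons row board ih =>
    rw [List.foldl_cons, ih, pv_cnt_row _ _ _ hv]
    simp
    ring

-- A's graveyard-building fold over any piece list, with both colour lists made explicit
theorem pv_gy_fold (cnt : String → Int) (sym : String → String)
    (ps : List (String × Int)) (w b : List String) :
    ps.foldl (fun g pc =>
        if pc.2 - cnt pc.1 > 0 then
          g.modify (if pvStrIsupper pc.1 then "w" else "b") []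
            (· ++ List.replicate (pc.2 - cnt pc.1).toNat (sym pc.1))
        else g)
      (PySem.Dict.mk [("w", w), ("b", b)])
    = PySem.Dict.mk
        [("w", w ++ (ps.filter (fun pc => pvStrIsupper pc.1)).flatMap
            (fun pc => List.replicate (max (pc.2 - cnt pc.1) 0).toNat (sym pc.1))),
         ("b", b ++ (ps.filter (fun pc => !pvStrIsupper pc.1)).flatMap
            (fun pc => List.replicate (max (pc.2 - cnt pc.1) 0).toNat (sym pc.1)))] := by
  induction ps generalizing w b with
  | nil => simp
  | cons pc ps ih =>
    rw [List.foldl_cons]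
    by_cases hd : pc.2 - cnt pc.1 > 0
    · have hmax : max (pc.2 - cnt pc.1) 0 = pc.2 - cnt pc.1 := by omega
      by_cases hu : pvStrIsupper pc.1
      · have hmod : (PySem.Dict.mk [("w", w), ("b", b)]).modify
              (if pvStrIsupper pc.1 then "w" else "b") []
              (· ++ List.replicate (pc.2 - cnt pc.1).toNat (sym pc.1))
            = PySem.Dict.mk [("w", w ++ List.replicate (pc.2 - cnt pc.1).toNat (sym pc.1)), ("b", b)] := by
          rw [if_pos hu]
          simp [PySem.Dict.modify, PySem.Dict.insert, PySem.Dict.getD, PySem.Dict.get?]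
        rw [if_pos hd, hmod, ih]
        simp [hu, hmax]
      · have hmod : (PySem.Dict.mk [("w", w), ("b", b)]).modify
              (if pvStrIsupper pc.1 then "w" else "b") []
              (· ++ List.replicate (pc.2 - cnt pc.1).toNat (sym pc.1))
            = PySem.Dict.mk [("w", w), ("b", b ++ List.replicate (pc.2 - cnt pc.1).toNat (sym pc.1))] := by
          rw [if_neg hu]
          simp [PySem.Dict.modify, PySem.Dict.insert, PySem.Dict.getD, PySem.Dict.get?]
        rw [if_pos hd, hmod, ih]
        simp [hu, hmax]
    · have hmax : max (pc.2 - cnt pc.1) 0 = 0 := by omega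
      rw [if_neg hd, ih]
      by_cases hu : pvStrIsupper pc.1 <;> simp [hu, hmax]

-- ---- B-side characterisation (roster as counted groups) ----

-- a roster list written as groups (piece, multiplicity)
def pvExpand (g : List (String × Nat)) : List String :=
  g.flatMap (fun p => List.replicate p.2 p.1)

-- remove one unit from the first non-empty group with the given key (mirror of list.remove)
def pvDec : List (String × Nat) → String → List (String × Nat)
  | [], _ => []
  | (x, n) :: t, y => if x = y ∧ n ≠ 0 then (x, n - 1) :: t else (x, n) :: pvDec t y

-- pvStep on expanded rosters, expressed on the groups
def pvStepG (st : List (String × Nat) × List (String × Nat)) (ch : String) :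
    List (String × Nat) × List (String × Nat) :=
  if st.1.any (fun p => p.1 == ch && decide (p.2 ≠ 0)) then (pvDec st.1 ch, st.2)
  else if st.2.any (fun p => p.1 == ch && decide (p.2 ≠ 0)) then (st.1, pvDec st.2 ch)
  else st

theorem pv_contains_expand (g : List (String × Nat)) (ch : String) :
    (pvExpand g).contains ch = g.any (fun p => p.1 == ch && decide (p.2 ≠ 0)) := by
  rw [Bool.eq_iff_iff]
  simp only [List.contains_iff_mem, pvExpand, List.mem_flatMap, List.mem_replicate,
    List.any_eq_true, Bool.and_eq_true, beq_iff_eq, decide_eq_true_eq]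
  constructor
  · rintro ⟨p, hp, hn, rfl⟩; exact ⟨p, hp, rfl, hn⟩
  · rintro ⟨p, hp, rfl, hn⟩; exact ⟨p, hp, hn, rfl⟩

theorem pv_erase_expand (g : List (String × Nat)) (ch : String) :
    (pvExpand g).erase ch = pvExpand (pvDec g ch) := by
  induction g with
  | nil => rfl
  | cons p t ih =>
    obtain ⟨x, n⟩ := p
    simp only [pvExpand, List.flatMap_cons] at *
    by_cases h : x = ch ∧ n ≠ 0
    · obtain ⟨rfl, hn⟩ := h
      obtain ⟨m, rfl⟩ : ∃ m, n = m + 1 := ⟨n - 1, by omega⟩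
      rw [pvDec, if_pos ⟨rfl, by omega⟩]
      simp [List.replicate_succ, List.erase_cons_head]
    · have hnot : ch ∉ List.replicate n x := by
        intro hm
        rcases List.mem_replicate.1 hm with ⟨hn0, hx⟩
        exact h ⟨hx.symm, hn0⟩
      rw [pvDec, if_neg h]
      simp only [List.flatMap_cons]
      rw [List.erase_append_right _ hnot, ih]

theorem pv_step_expand (a b : List (String × Nat)) (ch : String) :
    pvStep (pvExpand a, pvExpand b) ch
      = (pvExpand (pvStepG (a, b) ch).1, pvExpand (pvStepG (a, b) ch).2) := by
  unfold pvStep pvStepG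
  rw [pv_contains_expand, pv_contains_expand, pv_erase_expand, pv_erase_expand]
  split_ifs <;> rfl

theorem pv_foldl_expand (cells : List String) (a b : List (String × Nat)) :
    cells.foldl pvStep (pvExpand a, pvExpand b)
      = (pvExpand (cells.foldl pvStepG (a, b)).1, pvExpand (cells.foldl pvStepG (a, b)).2) := by
  induction cells generalizing a b with
  | nil => rfl
  | cons ch cells ih =>
    rw [List.foldl_cons, List.foldl_cons, pv_step_expand]
    exact ih _ _

-- pvDec does not change the keys
theorem pv_dec_keys (g : List (String × Nat)) (ch : String) :
    (pvDec g ch).map Prod.fst = g.map Prod.fst := by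
  induction g with
  | nil => rfl
  | cons p t ih =>
    obtain ⟨x, n⟩ := p
    rw [pvDec]
    split_ifs <;> simp [ih]

theorem pv_map_dec (g : List (String × Nat)) (ch : String) (cells : List String)
    (hnd : (g.map Prod.fst).Nodup) :
    (pvDec g ch).map (fun p => (p.1, p.2 - min p.2 (cells.count p.1)))
      = g.map (fun p => (p.1, p.2 - min p.2 ((ch :: cells).count p.1))) := by
  induction g with
  | nil => rfl
  | cons p t ih =>
    obtain ⟨x, n⟩ := p
    simp only [List.map_cons, List.nodup_cons] at hnd
    by_cases h : x = ch ∧ n ≠ 0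
    · obtain ⟨rfl, hn⟩ := h
      rw [pvDec, if_pos ⟨rfl, hn⟩]
      simp only [List.map_cons, List.cons_eq_cons]
      refine ⟨?_, ?_⟩
      · simp only [Prod.mk.injEq, List.count_cons_self, true_and]
        omega
      · apply List.map_congr_left
        intro p hp
        have hne : p.1 ≠ x := fun he => hnd.1 (he ▸ List.mem_map_of_mem hp)
        simp [List.count_cons, Ne.symm hne]
    · rw [pvDec, if_neg h]
      simp only [List.map_cons, List.cons_eq_cons]
      refine ⟨?_, ?_⟩
      · by_cases hx : x = ch
        · subst hx
          have hn0 : n = 0 := by by_contra hn; exact h ⟨rfl, hn⟩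
          simp [hn0]
        · simp [List.count_cons, Ne.symm hx]
      · exact ih hnd.2

-- counts at keys whose multiplicity is already 0 (or absent) do not matter
theorem pv_map_count_congr (g : List (String × Nat)) (ch : String) (cells : List String)
    (h : ∀ p ∈ g, p.1 = ch → p.2 = 0) :
    g.map (fun p => (p.1, p.2 - min p.2 (cells.count p.1)))
      = g.map (fun p => (p.1, p.2 - min p.2 ((ch :: cells).count p.1))) := by
  apply List.map_congr_left
  intro p hp
  by_cases hx : p.1 = ch
  · have h0 := h p hp hx
    simp [h0]
  · simp [List.count_cons, Ne.symm hx]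

-- the groups after processing all cells: each multiplicity drops by the (clipped) count seen
theorem pv_foldG_count (cells : List String) (a b : List (String × Nat))
    (hna : (a.map Prod.fst).Nodup) (hnb : (b.map Prod.fst).Nodup)
    (hdis : ∀ x ∈ a.map Prod.fst, x ∉ b.map Prod.fst) :
    cells.foldl pvStepG (a, b)
      = (a.map (fun p => (p.1, p.2 - min p.2 (cells.count p.1))),
         b.map (fun p => (p.1, p.2 - min p.2 (cells.count p.1)))) := by
  induction cells generalizing a b with
  | nil => simp
  | cons ch cells ih =>
    rw [List.foldl_cons]
    show cells.foldl pvStepG (pvStepG (a, b) ch) = _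
    by_cases h1 : (a.any fun p => p.1 == ch && decide (p.2 ≠ 0)) = true
    · rw [show pvStepG (a, b) ch = (pvDec a ch, b) by simp only [pvStepG]; rw [if_pos h1]]
      have hch : ch ∈ a.map Prod.fst := by
        rcases List.any_eq_true.1 h1 with ⟨p, hp, hpe⟩
        simp only [Bool.and_eq_true, beq_iff_eq, decide_eq_true_eq] at hpe
        exact hpe.1 ▸ List.mem_map_of_mem hp
      rw [ih (pvDec a ch) b (by rw [pv_dec_keys]; exact hna) hnb
            (by rw [pv_dec_keys]; exact hdis)]
      rw [pv_map_dec a ch cells hna]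
      rw [← pv_map_count_congr b ch cells
            (fun p hp hpe => by exact absurd (hpe ▸ List.mem_map_of_mem hp) (hdis ch hch))]
    · have ha0 : ∀ p ∈ a, p.1 = ch → p.2 = 0 := by
        intro p hp hpe
        by_contra hn
        exact h1 (List.any_eq_true.2 ⟨p, hp, by simp [hpe, hn]⟩)
      by_cases h2 : (b.any fun p => p.1 == ch && decide (p.2 ≠ 0)) = true
      · rw [show pvStepG (a, b) ch = (a, pvDec b ch) by
          simp only [pvStepG]; rw [if_neg h1, if_pos h2]]
        rw [ih a (pvDec b ch) hna (by rw [pv_dec_keys]; exact hnb)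
              (fun x hx => by rw [pv_dec_keys]; exact hdis x hx)]
        rw [pv_map_dec b ch cells hnb]
        rw [← pv_map_count_congr a ch cells ha0]
      · rw [show pvStepG (a, b) ch = (a, b) by
          simp only [pvStepG]; rw [if_neg h1, if_neg h2]]
        have hb0 : ∀ p ∈ b, p.1 = ch → p.2 = 0 := by
          intro p hp hpe
          by_contra hn
          exact h2 (List.any_eq_true.2 ⟨p, hp, by simp [hpe, hn]⟩)
        rw [ih a b hna hnb hdis,
            ← pv_map_count_congr a ch cells ha0, ← pv_map_count_congr b ch cells hb0]

-- the initial rosters, as counted groups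
def pvGW0 : List (String × Nat) := [("P",8),("R",2),("N",2),("B",2),("Q",1),("K",1)]
def pvGB0 : List (String × Nat) := [("p",8),("r",2),("n",2),("b",2),("q",1),("k",1)]

-- ===== VERDICT (by name: the statement is the Claim_ definition above) =====
theorem get_graveyard_spec : Claim_equal_get_graveyard := by
  intro board _
  show get_graveyard board = get_graveyard_alt board
  unfold get_graveyard get_graveyard_alt
  simp only []
  -- A side: tally dict = per-row count sums, graveyard fold = two flatMaps
  rw [show (PySem.Dict.ofList [("w", ([] : List String)), ("b", [])])
        = PySem.Dict.mk [("w", []), ("b", [])] from rfl]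
  rw [pv_gy_fold (fun s => (board.foldl (fun cur row =>
        row.foldl (fun cur ch =>
          if ch ≠ "+" then cur.insert ch (cur.getD ch 0 + 1) else cur) cur) PySem.Dict.empty).getD s 0)
      (fun s => pvLETTERS.getD s " ")]
  have hc : ∀ v : String, v ≠ "+" →
      (board.foldl (fun cur row =>
        row.foldl (fun cur ch =>
          if ch ≠ "+" then cur.insert ch (cur.getD ch 0 + 1) else cur) cur) PySem.Dict.empty).getD v 0
      = (board.map (fun row => (row.count v : Int))).sum := by
    intro v hv
    rw [pv_cnt_board _ _ _ hv]
    simp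
  have hU : ([("P",(8:Int)),("R",2),("N",2),("B",2),("Q",1),("K",1),
      ("p",8),("r",2),("n",2),("b",2),("q",1),("k",1)].filter (fun pc => pvStrIsupper pc.1))
      = [("P",(8:Int)),("R",2),("N",2),("B",2),("Q",1),("K",1)] := by rfl
  have hN : ([("P",(8:Int)),("R",2),("N",2),("B",2),("Q",1),("K",1),
      ("p",8),("r",2),("n",2),("b",2),("q",1),("k",1)].filter (fun pc => !pvStrIsupper pc.1))
      = [("p",(8:Int)),("r",2),("n",2),("b",2),("q",1),("k",1)] := by rfl
  rw [hU, hN]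
  simp only [List.flatMap_cons, List.flatMap_nil, List.nil_append]
  simp only [hc "P" (by decide), hc "R" (by decide), hc "N" (by decide), hc "B" (by decide),
    hc "Q" (by decide), hc "K" (by decide), hc "p" (by decide), hc "r" (by decide),
    hc "n" (by decide), hc "b" (by decide), hc "q" (by decide), hc "k" (by decide)]
  -- B side: roster fold = flattened-cell fold on groups, then the counted leftovers
  rw [show ((["P","P","P","P","P","P","P","P","R","R","N","N","B","B","Q","K"],
        ["p","p","p","p","p","p","p","p","r","r","n","n","b","b","q","k"]) :
        List String × List String) = (pvExpand pvGW0, pvExpand pvGB0) from rfl]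
  rw [show board.foldl (fun st row => row.foldl pvStep st) (pvExpand pvGW0, pvExpand pvGB0)
        = board.flatten.foldl pvStep (pvExpand pvGW0, pvExpand pvGB0) from List.foldl_flatten.symm]
  rw [pv_foldl_expand board.flatten pvGW0 pvGB0]
  rw [pv_foldG_count board.flatten pvGW0 pvGB0 (by decide) (by decide) (by decide)]
  simp only [pvGW0, pvGB0, List.map_cons, List.map_nil, pvExpand, List.flatMap_cons,
    List.flatMap_nil, List.append_nil, List.map_append, List.map_replicate]
  -- bridge the two count styles: Int sums of row counts vs Nat count of the flattened board
  have hlen : ∀ (v : String) (ni : Int) (n : Nat), ni = (n : Int) →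
      (max (ni - (board.map (fun row => (row.count v : Int))).sum) 0).toNat
        = n - min n (List.count v board.flatten) := by
    intro v ni n hn
    have hcast : ((List.count v board.flatten : Nat) : Int)
        = (board.map (fun row => (row.count v : Int))).sum := by
      rw [List.count_flatten]
      push_cast
      rw [List.map_map]
      rfl
    omega
  rw [hlen "P" 8 8 (by norm_num), hlen "R" 2 2 (by norm_num), hlen "N" 2 2 (by norm_num),
      hlen "B" 2 2 (by norm_num), hlen "Q" 1 1 (by norm_num), hlen "K" 1 1 (by norm_num),
      hlen "p" 8 8 (by norm_num), hlen "r" 2 2 (by norm_num), hlen "n" 2 2 (by norm_num),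
      hlen "b" 2 2 (by norm_num), hlen "q" 1 1 (by norm_num), hlen "k" 1 1 (by norm_num)]
  rfl
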